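-- pv_equiv track=rewrite | github.com/Qinjingxue/Smart-Unpacker | smart_unpacker/passwords/internal/error_signals.py | has_archive_damage_signals
-- ===== SOURCE A (Python) =====
-- def _norm(err_text: str) -> str:
--     return (err_text or "").lower()
--
-- def has_archive_damage_signals(err_text: str) -> bool:
--     err_lower = _norm(err_text)
--     return any(
--         marker in err_lower
--         for marker in (
--             "unexpected end of archive",
--             "unexpected end of data",
--             "missing volume",
--             "crc failed",
--             "data error in encrypted file",
--             "headers error",
--             "data error",
--             "can not open the file as archive",
--             "cannot open the file as",
--             "could not be opened by supported handlers",
--             "is not archive",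
--             "archive is corrupted",
--             "checksum error",
--             "unsupported compression method",
--             "unsupported method",
--         )
--     )
-- ===== SOURCE B (Python) =====
-- # Same marker constants as the original (the keyword set IS the spec);
-- # the detection algorithm below is different: one pass, first-char indexed.
-- _MARKERS = (
--     "unexpected end of archive",
--     "unexpected end of data",
--     "missing volume",
--     "crc failed",
--     "data error in encrypted file",
--     "headers error",
--     "data error",
--     "can not open the file as archive",
--     "cannot open the file as",
--     "could not be opened by supported handlers",
--     "is not archive",
--     "archive is corrupted",
--     "checksum error",
--     "unsupported compression method",
--     "unsupported method",
-- )
--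
-- # markers grouped by first character, so a single pass over the text only
-- # tests the markers that can possibly start at the current position
-- _BY_FIRST = {}
-- for _m in _MARKERS:
--     _BY_FIRST.setdefault(_m[0], []).append(_m)
--
--
-- def has_archive_damage_signals(err_text: str) -> bool:
--     text = (err_text or "").lower()
--     for i in range(len(text)):
--         for marker in _BY_FIRST.get(text[i], ()):
--             if text.startswith(marker, i):
--                 return True
--     return False
-- ===== Notes on version B (the rewrite author's own statement) =====
-- stated objective: alternative
-- what changed: Replaces the 15 independent per-marker substring scans of the text with a single left-to-right pass over the text that, at each position, prefix-tests only the markers indexed by first character in a prebuilt dict; the marker constants themselves are shared, since the keyword set is the spec.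
import Mathlib
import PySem

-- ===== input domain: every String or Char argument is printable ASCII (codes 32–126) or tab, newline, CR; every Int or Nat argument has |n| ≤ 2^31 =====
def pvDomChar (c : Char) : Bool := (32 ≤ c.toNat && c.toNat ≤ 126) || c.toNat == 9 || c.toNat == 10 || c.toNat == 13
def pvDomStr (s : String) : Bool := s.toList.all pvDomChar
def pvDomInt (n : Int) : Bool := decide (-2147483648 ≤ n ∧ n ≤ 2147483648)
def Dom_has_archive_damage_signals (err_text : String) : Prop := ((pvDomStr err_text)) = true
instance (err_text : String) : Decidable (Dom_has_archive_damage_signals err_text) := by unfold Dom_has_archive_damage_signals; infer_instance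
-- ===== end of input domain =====

-- B replaces A's 15 independent 'marker in text' scans by one left-to-right pass over the
-- text, probing at each position only the markers indexed by their first character
-- (objective: alternative traversal, same result; not claimed faster).

-- ===== PORT A =====
-- the marker tuple of A, in source order
def pvMarkers : List String :=
  [ "unexpected end of archive"
  , "unexpected end of data"
  , "missing volume"
  , "crc failed"
  , "data error in encrypted file"
  , "headers error"
  , "data error"
  , "can not open the file as archive"
  , "cannot open the file as"
  , "could not be opened by supported handlers"
  , "is not archive"
  , "archive is corrupted"
  , "checksum error"
  , "unsupported compression method"
  , "unsupported method" ]

def has_archive_damage_signals (err_text : String) : Bool :=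
  -- _norm: (err_text or "").lower(); a str is falsy exactly when empty
  let err_lower := PySem.Str.lower (if err_text == "" then "" else err_text)
  -- any(marker in err_lower for marker in (...))
  pvMarkers.any (fun marker => PySem.Str.isIn marker err_lower)

-- ===== PORT B =====
-- B shares A's marker constants (the keyword set is the spec); its algorithm differs.
-- _BY_FIRST.get(c, ()): the markers (as char lists, source order) whose first character is c
def pvMarkersFor (c : Char) : List (List Char) :=
  (pvMarkers.map String.toList).filter (fun m => m.head? == some c)

-- the outer 'for i in range(len(text))' loop, walking the suffixes of the text;
-- 'text.startswith(marker, i)' is the prefix test on the current suffix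
def pvScan : List Char → Bool
  | [] => false
  | c :: rest =>
      if (pvMarkersFor c).any (fun marker => List.isPrefixOf marker (c :: rest)) then true
      else pvScan rest

def has_archive_damage_signals_alt (err_text : String) : Bool :=
  let text := PySem.Str.lower (if err_text == "" then "" else err_text)
  pvScan text.toList

-- ===== PRECONDITION & SPEC =====
def Spec_has_archive_damage_signals (err_text : String) (out : Bool) : Prop := out = has_archive_damage_signals_alt err_text
instance (err_text : String) (out : Bool) : Decidable (Spec_has_archive_damage_signals err_text out) := by unfold Spec_has_archive_damage_signals; infer_instance

-- ===== CLAIM (what is proved, stated in full; the proofs are below) =====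
def Claim_equal_has_archive_damage_signals : Prop := ∀ (err_text : String), Dom_has_archive_damage_signals err_text → Spec_has_archive_damage_signals err_text (has_archive_damage_signals err_text)

-- ===== LEMMAS AND PROOFS =====

lemma pv_any_orb {α : Type} (l : List α) (p q : α → Bool) :
    l.any (fun x => p x || q x) = (l.any p || l.any q) := by
  induction l with
  | nil => simp
  | cons a t ih => cases hp : p a <;> cases hq : q a <;> simp [List.any_cons, hp, hq, ih]

-- every marker is nonempty
lemma pv_markers_ne_nil : ∀ m ∈ pvMarkers.map String.toList, m ≠ [] := by decide

-- the single pass finds a hit iff some marker is an infix of the text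
lemma pv_scan_eq (t : List Char) :
    pvScan t = (pvMarkers.map String.toList).any (fun m => decide (m <:+: t)) := by
  induction t with
  | nil =>
    rw [show pvScan [] = false from rfl]
    symm
    rw [List.any_eq_false]
    intro m hm
    simp only [decide_eq_true_eq, List.infix_nil]
    exact pv_markers_ne_nil m hm
  | cons c r ih =>
    have h1 : pvScan (c :: r) =
        ((pvMarkers.map String.toList).any
          (fun m => (m.head? == some c) && List.isPrefixOf m (c :: r)) || pvScan r) := by
      simp only [pvScan, pvMarkersFor, List.any_filter]
      cases (pvMarkers.map String.toList).any
          (fun m => (m.head? == some c) && List.isPrefixOf m (c :: r)) <;> simp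
    rw [h1, ih, ← pv_any_orb]
    apply PySem.List.any_congr_mem
    intro m hm
    match m, pv_markers_ne_nil m hm with
    | d :: m', _ =>
      by_cases hdc : d = c
      · subst hdc
        simp [List.isPrefixOf, List.infix_cons_iff, ← List.isPrefixOf_iff_prefix]
      · have hpre : ¬ ((d :: m') <+: (c :: r)) := by
          rintro ⟨t, ht⟩
          injection ht with h1 _
          exact hdc h1
        simp [List.isPrefixOf, hdc, List.infix_cons_iff, hpre]

-- A's marker-by-marker membership test equals the infix predicate
lemma pv_isIn_eq (m s : String) :
    PySem.Str.isIn m s = decide (m.toList <:+: s.toList) := by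
  by_cases h : m.toList <:+: s.toList
  · rw [(PySem.Str.isIn_iff_infix m s).2 h, decide_eq_true h]
  · rw [decide_eq_false h]
    exact Bool.eq_false_iff.2 (fun hc => h ((PySem.Str.isIn_iff_infix m s).1 hc))

-- ===== VERDICT (by name: the statement is the Claim_ definition above) =====
theorem has_archive_damage_signals_spec : Claim_equal_has_archive_damage_signals := by
  intro err_text _
  unfold Spec_has_archive_damage_signals has_archive_damage_signals has_archive_damage_signals_alt
  rw [pv_scan_eq, List.any_map]
  apply PySem.List.any_congr_mem
  intro m _
  exact pv_isIn_eq m _
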